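-- pv_equiv track=rewrite | github.com/wlin-at/ViTTA | utils/relation_map_utils.py | get_upper_traingle_idx_pair
-- ===== SOURCE A (Python) =====
-- def get_upper_traingle_idx_pair(t):
--     idx_list1 = []
--     idx_list2 = []
--
--     for value in range(0, t-1):  # value is from 0 to  (t-2)
--         n_duplicates = t-1 - value
--         idx_list1 +=  [value] * n_duplicates
--
--     for start in range(1, t): # start value from 1 to  t-1
--         idx_list2 +=  list(range(start, t))
--     return idx_list1, idx_list2
-- ===== SOURCE B (Python) =====
-- def get_upper_traingle_idx_pair(t):
--     idx_list1 = []
--     idx_list2 = []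
--     for i in range(t):
--         for j in range(i + 1, t):
--             idx_list1.append(i)
--             idx_list2.append(j)
--     return idx_list1, idx_list2
-- ===== Notes on version B (the rewrite author's own statement) =====
-- stated objective: simpler
-- what changed: A builds the row list by replication in one loop and the column list by range-concatenation in a second independent loop; B makes a single nested i<j traversal of the upper triangle, appending both coordinates of each pair together.
import Mathlib
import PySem

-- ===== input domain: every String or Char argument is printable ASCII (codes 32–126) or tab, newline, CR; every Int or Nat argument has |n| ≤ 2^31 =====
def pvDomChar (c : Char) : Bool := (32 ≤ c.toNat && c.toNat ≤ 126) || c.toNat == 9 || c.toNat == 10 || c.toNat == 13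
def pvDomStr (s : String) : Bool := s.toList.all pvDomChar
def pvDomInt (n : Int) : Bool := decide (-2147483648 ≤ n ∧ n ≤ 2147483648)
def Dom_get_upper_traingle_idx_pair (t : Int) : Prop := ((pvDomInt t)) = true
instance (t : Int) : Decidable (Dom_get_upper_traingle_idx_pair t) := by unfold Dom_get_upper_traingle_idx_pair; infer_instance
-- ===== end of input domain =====

-- B replaces A's two independent passes (replication pass for rows, range-concatenation pass
-- for columns) by a single nested i<j traversal emitting both coordinates of each pair together
-- (objective: simpler decomposition, same O(t^2) cost).

-- ===== PORT A =====
def get_upper_traingle_idx_pair (t : Int) : List Int × List Int :=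
  let idx_list1 : List Int := (PySem.List.pyRange 0 (t-1) 1).foldl
    (fun acc value => acc ++ List.replicate (t-1-value).toNat value) []
  let idx_list2 : List Int := (PySem.List.pyRange 1 t 1).foldl
    (fun acc start => acc ++ PySem.List.pyRange start t 1) []
  (idx_list1, idx_list2)

-- ===== PORT B =====
def get_upper_traingle_idx_pair_alt (t : Int) : List Int × List Int :=
  (PySem.List.pyRange 0 t 1).foldl
    (fun p i =>
      (PySem.List.pyRange (i+1) t 1).foldl (fun q j => (q.1 ++ [i], q.2 ++ [j])) p)
    ([], [])

-- ===== PRECONDITION & SPEC =====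
def Spec_get_upper_traingle_idx_pair (t : Int) (out : List Int × List Int) : Prop := out = get_upper_traingle_idx_pair_alt t
instance (t : Int) (out : List Int × List Int) : Decidable (Spec_get_upper_traingle_idx_pair t out) := by unfold Spec_get_upper_traingle_idx_pair; infer_instance

-- ===== CLAIM (what is proved, stated in full; the proofs are below) =====
def Claim_equal_get_upper_traingle_idx_pair : Prop := ∀ (t : Int), Dom_get_upper_traingle_idx_pair t → Spec_get_upper_traingle_idx_pair t (get_upper_traingle_idx_pair t)

-- ===== LEMMAS AND PROOFS =====

-- B's inner loop appends the constant i to the first list and each j of the range to the second.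
theorem pv_inner_fold (xs : List Int) (c : Int) (p : List Int × List Int) :
    xs.foldl (fun q j => (q.1 ++ [c], q.2 ++ [j])) p
      = (p.1 ++ List.replicate xs.length c, p.2 ++ xs) := by
  induction xs generalizing p with
  | nil => simp
  | cons x xs ih => simp [List.foldl_cons, ih, List.replicate_succ]

-- A pair-valued fold whose components are independent extends splits into two flatMaps.
theorem pv_pair_fold (f g : Int → List Int) (xs : List Int) (p : List Int × List Int) :
    xs.foldl (fun q i => (q.1 ++ f i, q.2 ++ g i)) p
      = (p.1 ++ xs.flatMap f, p.2 ++ xs.flatMap g) := by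
  induction xs generalizing p with
  | nil => simp
  | cons x xs ih => simp [List.foldl_cons, ih]

theorem pv_main (t : Int) :
    get_upper_traingle_idx_pair t = get_upper_traingle_idx_pair_alt t := by
  unfold get_upper_traingle_idx_pair get_upper_traingle_idx_pair_alt
  have hfun : (fun (p : List Int × List Int) (i : Int) =>
      (PySem.List.pyRange (i+1) t 1).foldl (fun q j => (q.1 ++ [i], q.2 ++ [j])) p)
      = fun p i => (p.1 ++ List.replicate (t-(i+1)).toNat i,
                    p.2 ++ PySem.List.pyRange (i+1) t 1) := by
    funext p i
    rw [pv_inner_fold, PySem.List.length_pyRange_one]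
  rw [hfun, pv_pair_fold, PySem.List.foldl_append_eq_flatMap,
      PySem.List.foldl_append_eq_flatMap]
  simp only [List.nil_append]
  rcases (by omega : t ≤ 0 ∨ 0 < t) with h | h
  · rw [PySem.List.pyRange_one_eq_nil (by omega : t - 1 ≤ 0),
        PySem.List.pyRange_one_eq_nil (by omega : t ≤ (1:Int)),
        PySem.List.pyRange_one_eq_nil (by omega : t ≤ (0:Int))]
    simp
  · have hn : t.toNat = (t-1).toNat + 1 := by omega
    have hc : (((t-1).toNat : Int)) = t - 1 := by omega
    rw [Prod.mk.injEq]
    constructor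
    · rw [PySem.List.pyRange_one 0 (t-1), PySem.List.pyRange_one 0 t]
      simp only [List.flatMap_map, zero_add, sub_zero]
      rw [hn, List.range_succ, List.flatMap_append]
      have hlast : List.flatMap (fun (a : Nat) => List.replicate (t - ((a:Int) + 1)).toNat (a:Int))
          [(t-1).toNat] = [] := by
        simp
        omega
      rw [hlast, List.append_nil]
      congr 1
      funext a
      congr 1
      omega
    · rw [PySem.List.pyRange_one 1 t, PySem.List.pyRange_one 0 t]
      simp only [List.flatMap_map, zero_add, sub_zero]
      rw [hn, List.range_succ, List.flatMap_append]
      have hlast : List.flatMap (fun (a : Nat) => PySem.List.pyRange ((a:Int) + 1) t)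
          [(t-1).toNat] = [] := by
        simp only [List.flatMap_cons, List.flatMap_nil, List.append_nil, hc]
        rw [show t - 1 + 1 = t from by ring]
        exact PySem.List.pyRange_one_eq_nil le_rfl
      rw [hlast, List.append_nil]
      congr 1
      funext a
      congr 1
      omega

-- ===== VERDICT (by name: the statement is the Claim_ definition above) =====
theorem get_upper_traingle_idx_pair_spec : Claim_equal_get_upper_traingle_idx_pair := by
  intro t _
  exact pv_main t
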